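-- pv_equiv track=rewrite | github.com/derrandz/python-news-crawler | projects/newsline/apps/web/newsworm/core/regexr.py | remove_double_slash
-- ===== SOURCE A (Python) =====
-- def remove_double_slash(url):
-- 	if not len(url) > 1: return url
-- 	urlbuffer = ""
-- 	for i in range(0, len(url)):
-- 		if i < len(url) - 1:
-- 			chars_same     = url[i] == url[i+1]
-- 			chars_slash    = url[i] == "/" or url[i+1] == "/"
-- 			if not chars_same or (chars_same and not chars_slash):
-- 				urlbuffer += url[i]
-- 			else:
-- 				if url[i-5:i+2] == "http://":
-- 					urlbuffer += url[i]
-- 		else: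
-- 			if url[i] != "/":
-- 				urlbuffer += url[i]
--
-- 	return urlbuffer
-- ===== SOURCE B (Python) =====
-- def remove_double_slash(url):
--     if len(url) <= 1:
--         return url
--     n = len(url)
--     parts = []
--     i = 0
--     while i < n:
--         if url[i] != '/':
--             parts.append(url[i])
--             i += 1
--             continue
--         j = i
--         while j < n and url[j] == '/':
--             j += 1
--         keep = 0 if j == n else 1
--         if j - i >= 2 and i >= 5 and url[i-5:i] == 'http:':
--             keep += 1
--         parts.append('/' * keep)
--         i = j
--     return ''.join(parts)
-- ===== Notes on version B (the rewrite author's own statement) =====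
-- stated objective: faster
-- what changed: A scans character by character with a lookahead pair test and a 7-char sliding slice url[i-5:i+2] at every index; B sweeps the string by maximal slash runs, emitting each run's slash count (0/1/2 from end-of-string and a single 'http:' lookback at the run start) at once, skipping the per-index window work.
import Mathlib
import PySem

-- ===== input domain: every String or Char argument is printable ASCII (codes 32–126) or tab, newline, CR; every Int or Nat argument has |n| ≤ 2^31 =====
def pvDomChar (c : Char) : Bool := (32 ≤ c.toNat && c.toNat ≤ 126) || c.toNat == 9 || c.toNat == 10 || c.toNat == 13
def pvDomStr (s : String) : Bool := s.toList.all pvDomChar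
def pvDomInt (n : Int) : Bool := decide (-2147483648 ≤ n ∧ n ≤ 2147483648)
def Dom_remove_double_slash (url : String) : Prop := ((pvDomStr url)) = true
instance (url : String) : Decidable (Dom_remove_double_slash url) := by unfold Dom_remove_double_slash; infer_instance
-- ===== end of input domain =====

-- B replaces A's per-index scan (lookahead pair test + a 7-char sliding window slice at every index) by a
-- run-based sweep that consumes each maximal slash run at once; same return value, measured constant-factor faster.

-- ===== PORT A =====
def remove_double_slash (url : String) : String :=
  if ¬ (PySem.Str.len url > 1) then url else
  let cs := url.toList
  let n : Int := PySem.List.len cs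
  let buf := (PySem.List.pyRange 0 n 1).foldl (fun urlbuffer i =>
    if i < n - 1 then
      let chars_same := PySem.List.pyGetD cs i ' ' = PySem.List.pyGetD cs (i+1) ' '
      let chars_slash := PySem.List.pyGetD cs i ' ' = '/' ∨ PySem.List.pyGetD cs (i+1) ' ' = '/'
      if ¬ chars_same ∨ (chars_same ∧ ¬ chars_slash) then
        urlbuffer ++ [PySem.List.pyGetD cs i ' ']
      else if PySem.List.slice cs (some (i-5)) (some (i+2)) = "http://".toList then
        urlbuffer ++ [PySem.List.pyGetD cs i ' ']
      else urlbuffer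
    else
      if ¬ (PySem.List.pyGetD cs i ' ' = '/') then urlbuffer ++ [PySem.List.pyGetD cs i ' ']
      else urlbuffer) []
  String.ofList buf

-- ===== PORT B =====
-- inner `while j < n and url[j] == '/'` of Source B: first index ≥ j that is not a slash
def bRun (cs : List Char) (j : Nat) : Nat :=
  if h : j < cs.length then
    if cs[j] = '/' then bRun cs (j+1) else j
  else j
  termination_by cs.length - j

theorem bRun_gt (cs : List Char) (j : Nat) (hj : j < cs.length) (hs : cs[j] = '/') :
    j < bRun cs j := by
  have : bRun cs j = bRun cs (j+1) := by rw [bRun]; simp [hj, hs]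
  rw [this]
  have : j + 1 ≤ bRun cs (j+1) := by
    clear this hs hj
    generalize hk : j + 1 = k
    clear hk
    fun_induction bRun cs k <;> omega
  omega

-- outer while loop of Source B, emitting chars front-to-back
def bLoop (cs : List Char) (i : Nat) : List Char :=
  if h : i < cs.length then
    if hs : cs[i] = '/' then
      let j := bRun cs i
      let keep := (if j = cs.length then 0 else 1) +
        (if 2 ≤ j - i ∧ 5 ≤ i ∧ (cs.drop (i-5)).take 5 = "http:".toList then 1 else 0)
      List.replicate keep '/' ++ bLoop cs j
    else cs[i] :: bLoop cs (i+1)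
  else []
  termination_by cs.length - i
  decreasing_by
  · have := bRun_gt cs i h hs; omega
  · omega

def remove_double_slash_alt (url : String) : String :=
  if PySem.Str.len url ≤ 1 then url
  else String.ofList (bLoop url.toList 0)

-- ===== PRECONDITION & SPEC =====
def Spec_remove_double_slash (url : String) (out : String) : Prop := out = remove_double_slash_alt url
instance (url : String) (out : String) : Decidable (Spec_remove_double_slash url out) := by unfold Spec_remove_double_slash; infer_instance

-- ===== CLAIM (what is proved, stated in full; the proofs are below) =====
def Claim_equal_remove_double_slash : Prop := ∀ (url : String), Dom_remove_double_slash url → Spec_remove_double_slash url (remove_double_slash url)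

-- ===== LEMMAS AND PROOFS =====

-- the characters A's loop body appends at index i, as a standalone function
def gA (cs : List Char) (i : Int) : List Char :=
  let n : Int := PySem.List.len cs
  if i < n - 1 then
    if ¬ (PySem.List.pyGetD cs i ' ' = PySem.List.pyGetD cs (i+1) ' ') ∨
       ((PySem.List.pyGetD cs i ' ' = PySem.List.pyGetD cs (i+1) ' ') ∧
        ¬ (PySem.List.pyGetD cs i ' ' = '/' ∨ PySem.List.pyGetD cs (i+1) ' ' = '/')) then
      [PySem.List.pyGetD cs i ' ']
    else if PySem.List.slice cs (some (i-5)) (some (i+2)) = "http://".toList then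
      [PySem.List.pyGetD cs i ' ']
    else []
  else
    if ¬ (PySem.List.pyGetD cs i ' ' = '/') then [PySem.List.pyGetD cs i ' '] else []

-- A's output from index i on, recursively
def specFrom (cs : List Char) (i : Nat) : List Char :=
  if _h : i < cs.length then gA cs i ++ specFrom cs (i+1) else []
  termination_by cs.length - i

theorem specFrom_of_ge (cs : List Char) (i : Nat) (h : ¬ i < cs.length) : specFrom cs i = [] := by
  rw [specFrom]; simp [h]

theorem specFrom_of_lt (cs : List Char) (i : Nat) (h : i < cs.length) :
    specFrom cs i = gA cs i ++ specFrom cs (i+1) := by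
  rw [specFrom]; simp [h]

theorem A_foldl (cs : List Char) (i : Nat) (acc : List Char) :
    (PySem.List.pyRange (i : Int) (cs.length : Int) 1).foldl (fun urlbuffer k =>
      if k < (PySem.List.len cs) - 1 then
        if ¬ (PySem.List.pyGetD cs k ' ' = PySem.List.pyGetD cs (k+1) ' ') ∨
           ((PySem.List.pyGetD cs k ' ' = PySem.List.pyGetD cs (k+1) ' ') ∧
            ¬ (PySem.List.pyGetD cs k ' ' = '/' ∨ PySem.List.pyGetD cs (k+1) ' ' = '/')) then
          urlbuffer ++ [PySem.List.pyGetD cs k ' ']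
        else if PySem.List.slice cs (some (k-5)) (some (k+2)) = "http://".toList then
          urlbuffer ++ [PySem.List.pyGetD cs k ' ']
        else urlbuffer
      else
        if ¬ (PySem.List.pyGetD cs k ' ' = '/') then urlbuffer ++ [PySem.List.pyGetD cs k ' ']
        else urlbuffer) acc = acc ++ specFrom cs i := by
  generalize hm : cs.length - i = m
  induction m generalizing i acc with
  | zero =>
    have hge : ¬ i < cs.length := by omega
    rw [PySem.List.pyRange_one_eq_nil (by exact_mod_cast Nat.le_of_not_lt hge)]
    simp [specFrom_of_ge cs i hge]
  | succ m ih =>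
    have hlt : i < cs.length := by omega
    rw [PySem.List.pyRange_one_cons (by exact_mod_cast hlt)]
    simp only [List.foldl_cons]
    have hbody : ∀ (acc' : List Char),
        (if (i:Int) < (PySem.List.len cs) - 1 then
          if ¬ (PySem.List.pyGetD cs (i:Int) ' ' = PySem.List.pyGetD cs ((i:Int)+1) ' ') ∨
             ((PySem.List.pyGetD cs (i:Int) ' ' = PySem.List.pyGetD cs ((i:Int)+1) ' ') ∧
              ¬ (PySem.List.pyGetD cs (i:Int) ' ' = '/' ∨ PySem.List.pyGetD cs ((i:Int)+1) ' ' = '/')) then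
            acc' ++ [PySem.List.pyGetD cs (i:Int) ' ']
          else if PySem.List.slice cs (some ((i:Int)-5)) (some ((i:Int)+2)) = "http://".toList then
            acc' ++ [PySem.List.pyGetD cs (i:Int) ' ']
          else acc'
        else
          if ¬ (PySem.List.pyGetD cs (i:Int) ' ' = '/') then acc' ++ [PySem.List.pyGetD cs (i:Int) ' ']
          else acc') = acc' ++ gA cs (i:Int) := by
      intro acc'
      simp only [gA]
      split_ifs <;> simp
    rw [hbody]
    have hcast : ((i : Int) + 1) = (((i+1 : Nat)) : Int) := by push_cast; ring
    rw [hcast, ih (i+1) _ (by omega), specFrom_of_lt cs i hlt, List.append_assoc]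

theorem bRun_le (cs : List Char) (j : Nat) (hj : j ≤ cs.length) : bRun cs j ≤ cs.length := by
  fun_induction bRun cs j <;> omega

theorem bRun_slash (cs : List Char) (j : Nat) :
    ∀ t, j ≤ t → t < bRun cs j → ∀ (ht : t < cs.length), cs[t] = '/' := by
  fun_induction bRun cs j with
  | case1 j hj hs ih =>
    intro t h1 h2 ht
    rcases Nat.eq_or_lt_of_le h1 with rfl | h1'
    · exact hs
    · exact ih t h1' h2 ht
  | case2 j hj hs => intro t h1 h2 ht; omega
  | case3 j hj => intro t h1 h2 ht; omega

theorem bRun_stop (cs : List Char) (j : Nat) :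
    ∀ (h : bRun cs j < cs.length), cs[bRun cs j] ≠ '/' := by
  fun_induction bRun cs j with
  | case1 j hj hs ih => exact ih
  | case2 j hj hs => intro h; exact hs
  | case3 j hj => intro h; omega

theorem gA_last (cs : List Char) (k : Nat) (h : k + 1 = cs.length) :
    gA cs k = if cs[k]'(by omega) = '/' then [] else [cs[k]'(by omega)] := by
  unfold gA
  have hnot : ¬ ((k : Int) < PySem.List.len cs - 1) := by simp [PySem.List.len_eq]; omega
  rw [if_neg hnot]
  have e1 : PySem.List.pyGetD cs (k : Int) ' ' = cs[k]'(by omega) := by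
    rw [PySem.List.pyGetD_natCast, List.getD_eq_getElem cs ' ' (by omega)]
  rw [e1]
  split_ifs <;> simp_all

theorem gA_mid (cs : List Char) (k : Nat) (h : k + 1 < cs.length) :
    gA cs k = if cs[k]'(by omega) = '/' ∧ cs[k+1]'h = '/' then
        (if PySem.List.slice cs (some ((k:Int)-5)) (some ((k:Int)+2)) = "http://".toList
          then ['/'] else [])
      else [cs[k]'(by omega)] := by
  unfold gA
  have hyes : ((k : Int) < PySem.List.len cs - 1) := by simp [PySem.List.len_eq]; omega
  rw [if_pos hyes]
  have e1 : PySem.List.pyGetD cs (k : Int) ' ' = cs[k]'(by omega) := by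
    rw [PySem.List.pyGetD_natCast, List.getD_eq_getElem cs ' ' (by omega)]
  have ecast : (k : Int) + 1 = ((k+1 : Nat) : Int) := by push_cast; ring
  have e2 : PySem.List.pyGetD cs ((k : Int) + 1) ' ' = cs[k+1]'h := by
    rw [ecast, PySem.List.pyGetD_natCast, List.getD_eq_getElem cs ' ' h]
  rw [e1, e2]
  by_cases h0 : cs[k]'(by omega) = '/' <;> by_cases h1 : cs[k+1]'h = '/'
  · simp [h0, h1]
  · have hsame : ¬ (cs[k]'(by omega) = cs[k+1]'h) := by
      rw [h0]; intro hc; exact h1 hc.symm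
    clear hsame
    simp [h0, h1]
    exact fun hc => absurd hc.symm h1
  · simp [h0, h1]
  · by_cases hc : cs[k]'(by omega) = cs[k+1]'h
    · simp [h1, hc]
    · simp [h0, h1, hc]

theorem slice_http_iff (cs : List Char) (k : Nat) (hk2 : k + 2 ≤ cs.length)
    (h0 : cs[k]'(by omega) = '/') (h1 : cs[k+1]'(by omega) = '/') :
    (PySem.List.slice cs (some ((k:Int)-5)) (some ((k:Int)+2)) = "http://".toList)
    ↔ (5 ≤ k ∧ (cs.drop (k-5)).take 5 = "http:".toList) := by
  by_cases h5 : 5 ≤ k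
  · have ea : (k : Int) - 5 = ((k - 5 : Nat) : Int) := by omega
    have eb : (k : Int) + 2 = ((k + 2 : Nat) : Int) := by omega
    rw [ea, eb, PySem.List.slice_natCast]
    have e7 : (k + 2) - (k - 5) = 7 := by omega
    rw [e7]
    have hsplit : (cs.drop (k-5)).take 7 = (cs.drop (k-5)).take 5 ++ ((cs.drop (k-5)).drop 5).take 2 := by
      rw [← List.take_add]
    have hdd : (cs.drop (k-5)).drop 5 = cs.drop k := by
      rw [List.drop_drop]; congr 1; omega
    have hk1 : k < cs.length := by omega
    have hk1' : k + 1 < cs.length := by omega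
    have htail : (cs.drop k).take 2 = ['/', '/'] := by
      rw [List.drop_eq_getElem_cons hk1, List.take_succ_cons,
          List.drop_eq_getElem_cons hk1', List.take_succ_cons, h0, h1]
      simp
    rw [hsplit, hdd, htail]
    have hlit : "http://".toList = "http:".toList ++ ['/', '/'] := by decide
    rw [hlit]
    constructor
    · intro hh
      have hlen5 : ((cs.drop (k-5)).take 5).length = "http:".toList.length := by
        simp [List.length_take]; omega
      exact ⟨h5, List.append_inj_left hh hlen5⟩
    · intro ⟨_, hh⟩; rw [hh]
  · constructor
    · intro hh
      exfalso
      have hl := congrArg List.length hh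
      rw [PySem.List.length_slice] at hl
      have ea : (k : Int) - 5 = -(((5 - k : Nat)) : Int) := by omega
      have eb : (k : Int) + 2 = ((k + 2 : Nat) : Int) := by omega
      rw [ea, eb, PySem.List.clampIdx_neg_natCast cs.length (5-k) (by omega),
          PySem.List.clampIdx_natCast] at hl
      simp at hl
      omega
    · intro ⟨hh, _⟩; omega

theorem inner_kill (cs : List Char) (k : Nat) (h5 : 5 ≤ k) (hk : k ≤ cs.length)
    (hprev : cs[k-1]'(by omega) = '/') : ¬ ((cs.drop (k-5)).take 5 = "http:".toList) := by
  intro heq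
  have hget : ((cs.drop (k-5)).take 5)[4]? = some ':' := by rw [heq]; rfl
  rw [List.getElem?_take, if_pos (by omega), List.getElem?_drop] at hget
  have e2 : k - 5 + 4 = k - 1 := by omega
  rw [e2, List.getElem?_eq_getElem (by omega), hprev] at hget
  simp at hget

theorem run_tail (cs : List Char) (i j : Nat) (hj : j ≤ cs.length)
    (hslash : ∀ t, i ≤ t → t < j → ∀ (ht : t < cs.length), cs[t] = '/')
    (hstop : ∀ (h : j < cs.length), cs[j] ≠ '/') :
    ∀ t, i < t → t < j → specFrom cs t = (if j = cs.length then [] else ['/']) ++ specFrom cs j := by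
  suffices H : ∀ m t, j - t ≤ m → i < t → t < j →
      specFrom cs t = (if j = cs.length then [] else ['/']) ++ specFrom cs j by
    intro t h1 h2; exact H (j - t) t le_rfl h1 h2
  intro m
  induction m with
  | zero => intro t hm h1 h2; omega
  | succ m ih =>
    intro t hm h1 h2
    have ht : t < cs.length := by omega
    rw [specFrom_of_lt cs t ht]
    by_cases hlast : t + 1 = j
    · by_cases hjn : j = cs.length
      · rw [gA_last cs t (by omega)]
        rw [if_pos (hslash t (by omega) h2 ht)]
        simp [hjn, hlast]
      · have hjl : j < cs.length := by omega
        rw [gA_mid cs t (by omega)]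
        have h0 : cs[t] = '/' := hslash t (by omega) h2 ht
        have h1' : ¬ (cs[t+1]'(by omega) = '/') := by
          have hst := hstop hjl
          intro hc; apply hst
          have : t + 1 = j := hlast
          simp_all
        rw [if_neg (by intro hc; exact h1' hc.2)]
        rw [if_neg hjn, h0]
        rw [hlast]
    · have ht1 : t + 1 < j := by omega
      rw [gA_mid cs t (by omega)]
      have h0 : cs[t] = '/' := hslash t (by omega) h2 ht
      have h1' : cs[t+1]'(by omega) = '/' := hslash (t+1) (by omega) ht1 (by omega)
      rw [if_pos ⟨h0, h1'⟩]
      rw [if_neg (by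
        intro hsl
        rw [slice_http_iff cs t (by omega) h0 h1'] at hsl
        exact inner_kill cs t hsl.1 (by omega)
          (hslash (t-1) (by omega) (by omega) (by omega)) hsl.2)]
      rw [List.nil_append]
      exact ih (t+1) (by omega) (by omega) ht1

theorem bLoop_eq_specFrom (cs : List Char) (i : Nat) : bLoop cs i = specFrom cs i := by
  suffices H : ∀ m i, cs.length - i ≤ m → bLoop cs i = specFrom cs i by
    exact H (cs.length - i) i le_rfl
  intro m
  induction m with
  | zero =>
    intro i hm
    have hge : ¬ i < cs.length := by omega
    rw [bLoop, dif_neg hge, specFrom_of_ge cs i hge]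
  | succ m ih =>
    intro i hm
    by_cases hlt : i < cs.length
    · rw [bLoop, dif_pos hlt, specFrom_of_lt cs i hlt]
      by_cases hs : cs[i] = '/'
      · rw [dif_pos hs]
        have hij : i < bRun cs i := bRun_gt cs i hlt hs
        have hjle : bRun cs i ≤ cs.length := bRun_le cs i (le_of_lt hlt)
        have hih : bLoop cs (bRun cs i) = specFrom cs (bRun cs i) := ih (bRun cs i) (by omega)
        set j := bRun cs i with hj
        have hslash : ∀ t, i ≤ t → t < j → ∀ (ht : t < cs.length), cs[t] = '/' :=
          bRun_slash cs i
        have hstop : ∀ (h : j < cs.length), cs[j] ≠ '/' := bRun_stop cs i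
        simp only [hih]
        by_cases hk1 : i + 1 = j
        · have hrep : ¬ (2 ≤ j - i ∧ 5 ≤ i ∧ (cs.drop (i-5)).take 5 = "http:".toList) := by
            intro hc; omega
          by_cases hjn : j = cs.length
          · conv_rhs => rw [gA_last cs i (by omega), if_pos hs]
            rw [if_pos hjn, if_neg hrep, hk1]
            simp
          · have h1' : ¬ (cs[i+1]'(by omega) = '/') := by
              intro hc
              apply hstop (by omega)
              simp only [← hk1]
              exact hc
            conv_rhs => rw [gA_mid cs i (by omega), if_neg (fun hc => h1' hc.2), hs]
            rw [if_neg hjn, if_neg hrep, hk1]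
            simp
        · have hk2 : i + 2 ≤ j := by omega
          have h1' : cs[i+1]'(by omega) = '/' := hslash (i+1) (by omega) (by omega) (by omega)
          conv_rhs => rw [gA_mid cs i (by omega), if_pos (show cs[i] = '/' ∧ cs[i+1]'(by omega) = '/' from ⟨hs, h1'⟩)]
          rw [run_tail cs i j hjle hslash hstop (i+1) (by omega) (by omega)]
          have h2le : 2 ≤ j - i := by omega
          simp only [slice_http_iff cs i (by omega) hs h1']
          split_ifs <;> simp_all [List.replicate_succ]
      · rw [dif_neg hs]
        have hgi : gA cs i = [cs[i]] := by
          by_cases hl : i + 1 = cs.length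
          · rw [gA_last cs i hl, if_neg hs]
          · rw [gA_mid cs i (by omega), if_neg (by intro hc; exact hs hc.1)]
        rw [hgi, ih (i+1) (by omega)]
        rfl
    · rw [bLoop, dif_neg hlt, specFrom_of_ge cs i hlt]

-- ===== VERDICT (by name: the statement is the Claim_ definition above) =====
theorem remove_double_slash_spec : Claim_equal_remove_double_slash := by
  intro url _
  unfold Spec_remove_double_slash remove_double_slash remove_double_slash_alt
  have hlen : PySem.Str.len url = (url.toList.length : Int) := by simp
  by_cases h : url.toList.length ≤ 1
  · simp only [hlen]
    rw [if_pos (by omega), if_pos (by exact_mod_cast h)]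
  · simp only [hlen]
    rw [if_neg (by omega), if_neg (by omega)]
    have hA := A_foldl url.toList 0 []
    simp only [PySem.List.len_eq] at hA ⊢
    rw [show ((0:Int) = ((0:Nat):Int)) from rfl, hA, List.nil_append,
        bLoop_eq_specFrom]
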